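-- pv_equiv track=rewrite | github.com/paulinapp1/pp1-rozwiazania | test3_pp1/zad27.04.py | f
-- ===== SOURCE A (Python) =====
-- def f(card_number):
--     result=""
--     for number in range(len(card_number)):
--         if number==0 or number==1:
--             result+=card_number[number]
--         elif number>1 and number<=11:
--             result+="*"
--         else:
--             result+=card_number[number]
--     return result
-- ===== SOURCE B (Python) =====
-- def f(card_number):
--     return card_number[:2] + "*" * max(0, min(len(card_number), 12) - 2) + card_number[12:]
-- ===== Notes on version B (the rewrite author's own statement) =====
-- stated objective: simpler
-- what changed: Replaces the per-character loop with repeated string concatenation by a single slicing expression: the first two characters, a computed run of stars for indices 2..11 that exist, and the tail from index 12 on.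
import Mathlib
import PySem

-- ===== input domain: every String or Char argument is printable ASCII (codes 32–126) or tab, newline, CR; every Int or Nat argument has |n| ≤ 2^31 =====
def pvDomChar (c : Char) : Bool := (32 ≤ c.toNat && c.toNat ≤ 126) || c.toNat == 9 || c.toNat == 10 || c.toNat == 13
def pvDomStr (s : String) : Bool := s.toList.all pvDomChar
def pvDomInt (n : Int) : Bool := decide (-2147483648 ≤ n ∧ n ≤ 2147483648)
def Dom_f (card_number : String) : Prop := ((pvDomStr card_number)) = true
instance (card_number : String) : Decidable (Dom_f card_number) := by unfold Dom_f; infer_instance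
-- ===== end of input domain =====

-- B changes A's per-index loop with character-by-character appends into one slicing
-- expression (prefix + computed star run + suffix); objective: simpler.

-- ===== PORT A =====
-- loop 'for number in range(len(card_number))' over the characters, building result;
-- card_number[number] is always in range, so pyGetD with a dummy default is exact here
def f (card_number : String) : String :=
  let cs := card_number.toList
  String.ofList ((PySem.List.pyRange 0 (cs.length : Int) 1).foldl
    (fun result number =>
      if number = 0 ∨ number = 1 then result ++ [PySem.List.pyGetD cs number ' ']
      else if 1 < number ∧ number ≤ 11 then result ++ ['*']
      else result ++ [PySem.List.pyGetD cs number ' ']) [])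

-- ===== PORT B =====
-- card_number[:2] + '*' * max(0, min(len(card_number), 12) - 2) + card_number[12:]
def f_alt (card_number : String) : String :=
  let cs := card_number.toList
  String.ofList (PySem.List.slice cs none (some 2)
    ++ List.replicate (max 0 (min (cs.length : Int) 12 - 2)).toNat '*'
    ++ PySem.List.slice cs (some 12) none)

-- ===== PRECONDITION & SPEC =====
def Spec_f (card_number : String) (out : String) : Prop := out = f_alt card_number
instance (card_number : String) (out : String) : Decidable (Spec_f card_number out) := by unfold Spec_f; infer_instance

-- ===== CLAIM (what is proved, stated in full; the proofs are below) =====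
def Claim_equal_f : Prop := ∀ (card_number : String), Dom_f card_number → Spec_f card_number (f card_number)

-- ===== LEMMAS AND PROOFS =====

-- the loop body always appends exactly one character
lemma f_body_eq (cs : List Char) :
    (fun (result : List Char) (number : Int) =>
      if number = 0 ∨ number = 1 then result ++ [PySem.List.pyGetD cs number ' ']
      else if 1 < number ∧ number ≤ 11 then result ++ ['*']
      else result ++ [PySem.List.pyGetD cs number ' '])
    = (fun result number => result ++
        [if number = 0 ∨ number = 1 then PySem.List.pyGetD cs number ' '
         else if 1 < number ∧ number ≤ 11 then '*'
         else PySem.List.pyGetD cs number ' ']) := by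
  funext r n; split_ifs <;> rfl

-- the mapped loop equals prefix ++ stars ++ suffix
lemma f_map_eq (cs : List Char) :
    (List.range cs.length).map (fun (k : Nat) =>
      if (k : Int) = 0 ∨ (k : Int) = 1 then cs.getD k ' '
      else if 1 < (k : Int) ∧ (k : Int) ≤ 11 then '*'
      else cs.getD k ' ')
    = cs.take 2 ++ List.replicate (max 0 (min (cs.length : Int) 12 - 2)).toNat '*'
      ++ cs.drop 12 := by
  apply List.ext_getElem
  · simp [List.length_take, List.length_replicate, List.length_drop]
    omega
  · intro i h1 h2
    have hn : i < cs.length := by simpa using h1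
    simp only [List.getElem_map, List.getElem_range]
    by_cases hi2 : i < 2
    · have h' : i < (List.take 2 cs ++ List.replicate (max 0 (min (cs.length : Int) 12 - 2)).toNat '*').length := by
        simp [List.length_take, List.length_replicate]; omega
      have h'' : i < (List.take 2 cs).length := by
        simp [List.length_take]; omega
      rw [List.getElem_append, dif_pos h', List.getElem_append, dif_pos h'', List.getElem_take,
          if_pos (by omega : (i : Int) = 0 ∨ (i : Int) = 1)]
      exact List.getD_eq_getElem cs ' ' hn
    · by_cases hi12 : i < 12
      · have h' : i < (List.take 2 cs ++ List.replicate (max 0 (min (cs.length : Int) 12 - 2)).toNat '*').length := by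
          simp [List.length_take, List.length_replicate]; omega
        have h'' : ¬ i < (List.take 2 cs).length := by
          simp [List.length_take]; omega
        rw [List.getElem_append, dif_pos h', List.getElem_append, dif_neg h'', List.getElem_replicate,
            if_neg (by omega : ¬ ((i : Int) = 0 ∨ (i : Int) = 1)),
            if_pos (by omega : 1 < (i : Int) ∧ (i : Int) ≤ 11)]
      · have h' : ¬ i < (List.take 2 cs ++ List.replicate (max 0 (min (cs.length : Int) 12 - 2)).toNat '*').length := by
          simp [List.length_take, List.length_replicate]; omega
        rw [List.getElem_append, dif_neg h', List.getElem_drop,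
            if_neg (by omega : ¬ ((i : Int) = 0 ∨ (i : Int) = 1)),
            if_neg (by omega : ¬ (1 < (i : Int) ∧ (i : Int) ≤ 11)),
            List.getD_eq_getElem cs ' ' hn]
        congr 1
        simp only [List.length_append, List.length_take, List.length_replicate]
        omega

lemma slice_to_two (cs : List Char) : PySem.List.slice cs none (some 2) = cs.take 2 := by
  have h := PySem.List.slice_to_natCast cs 2
  norm_num at h
  exact h

lemma slice_from_twelve (cs : List Char) : PySem.List.slice cs (some 12) none = cs.drop 12 := by
  have h := PySem.List.slice_from_natCast cs 12
  norm_num at h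
  exact h

-- ===== VERDICT (by name: the statement is the Claim_ definition above) =====
theorem f_spec : Claim_equal_f := by
  intro s _
  unfold Spec_f f f_alt
  simp only
  rw [f_body_eq, PySem.List.foldl_append_singleton_eq_map, List.nil_append,
      PySem.List.pyRange_one, slice_to_two, slice_from_twelve]
  congr 1
  rw [← f_map_eq s.toList]
  simp only [Int.sub_zero, Int.toNat_natCast, List.map_map]
  apply List.map_congr_left
  intro k hk
  simp only [Function.comp, Int.zero_add, PySem.List.pyGetD_natCast]
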